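-- pv_equiv track=rewrite | github.com/MuhammadAlfariziTazkia/algoritma-otp-modifikasi | evaluasi/evaluasi_kasiski.py | get_slice_of_all_factors
-- ===== SOURCE A (Python) =====
-- def get_slice_of_all_factors(list_of_factors):
--   slice_list = []
--   for factor_index in range(len(list_of_factors)):
--     factor = list_of_factors[factor_index]
--     for num in factor:
--       is_have_slice = True
--       for index in range(0, len(list_of_factors)):
--         if num not in list_of_factors[index]:
--           is_have_slice = False
--           break
--       if is_have_slice and num not in slice_list:
--         slice_list.append(num)
--
--   return slice_list
-- ===== SOURCE B (Python) =====
-- def get_slice_of_all_factors(list_of_factors):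
--   if not list_of_factors:
--     return []
--   common = set(list_of_factors[0])
--   for factor in list_of_factors[1:]:
--     common &= set(factor)
--   slice_list = []
--   for factor in list_of_factors:
--     for num in factor:
--       if num in common and num not in slice_list:
--         slice_list.append(num)
--   return slice_list
-- ===== Notes on version B (the rewrite author's own statement) =====
-- stated objective: faster
-- what changed: B precomputes the intersection of all factor lists once as a set and then makes a single ordered dedup pass, instead of A's re-scanning every list for every element.
import Mathlib
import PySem

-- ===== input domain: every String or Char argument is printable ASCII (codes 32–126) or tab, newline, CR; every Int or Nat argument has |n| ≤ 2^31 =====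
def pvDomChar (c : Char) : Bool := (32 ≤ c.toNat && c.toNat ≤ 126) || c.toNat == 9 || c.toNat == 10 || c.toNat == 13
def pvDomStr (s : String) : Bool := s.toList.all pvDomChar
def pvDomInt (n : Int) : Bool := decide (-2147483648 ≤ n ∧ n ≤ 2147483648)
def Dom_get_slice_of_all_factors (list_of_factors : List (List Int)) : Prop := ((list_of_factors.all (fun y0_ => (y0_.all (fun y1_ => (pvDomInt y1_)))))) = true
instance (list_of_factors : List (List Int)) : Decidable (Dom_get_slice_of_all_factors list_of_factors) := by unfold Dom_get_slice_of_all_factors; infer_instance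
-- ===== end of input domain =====

-- B replaces A's per-element rescan of every list by one precomputed set intersection plus a single ordered dedup pass (faster).


-- ===== PORT A =====
def get_slice_of_all_factors (list_of_factors : List (List Int)) : List Int :=
  (PySem.List.pyRange 0 (list_of_factors.length : Int) 1).foldl (fun slice_list factor_index =>
    let factor := PySem.List.pyGetD list_of_factors factor_index []
    factor.foldl (fun slice_list num =>
      -- inner 'for index … if num not in …: break' loop = all indices contain num
      let is_have_slice := (PySem.List.pyRange 0 (list_of_factors.length : Int) 1).all
        (fun index => (PySem.List.pyGetD list_of_factors index []).contains num)
      if is_have_slice && !(slice_list.contains num) then slice_list ++ [num] else slice_list)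
      slice_list) []

-- ===== PORT B =====
def get_slice_of_all_factors_alt (list_of_factors : List (List Int)) : List Int :=
  match list_of_factors with
  | [] => []
  | f0 :: rest =>
    let common : PySem.Set Int :=
      rest.foldl (fun s f => PySem.Set.inter s (PySem.Set.ofList f)) (PySem.Set.ofList f0)
    (f0 :: rest).foldl (fun slice_list factor =>
      factor.foldl (fun slice_list num =>
        if PySem.Set.contains common num && !(slice_list.contains num)
        then slice_list ++ [num] else slice_list) slice_list) []

-- ===== PRECONDITION & SPEC =====
def Spec_get_slice_of_all_factors (list_of_factors : List (List Int)) (out : List Int) : Prop := out = get_slice_of_all_factors_alt list_of_factors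
instance (list_of_factors : List (List Int)) (out : List Int) : Decidable (Spec_get_slice_of_all_factors list_of_factors out) := by unfold Spec_get_slice_of_all_factors; infer_instance

-- ===== CLAIM (what is proved, stated in full; the proofs are below) =====
def Claim_equal_get_slice_of_all_factors : Prop := ∀ (list_of_factors : List (List Int)), Dom_get_slice_of_all_factors list_of_factors → Spec_get_slice_of_all_factors list_of_factors (get_slice_of_all_factors list_of_factors)

-- ===== LEMMAS AND PROOFS =====

-- membership in B's folded intersection = membership in the seed set and in every remaining list
lemma contains_foldl_inter (rest : List (List Int)) (s : PySem.Set Int) (num : Int) :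
    PySem.Set.contains (rest.foldl (fun s f => PySem.Set.inter s (PySem.Set.ofList f)) s) num
      = (PySem.Set.contains s num && rest.all (fun f => f.contains num)) := by
  induction rest generalizing s with
  | nil => simp
  | cons f fs ih =>
    simp only [List.foldl_cons, List.all_cons, ih]
    have : PySem.Set.contains (PySem.Set.inter s (PySem.Set.ofList f)) num
        = (PySem.Set.contains s num && f.contains num) := by
      by_cases h1 : num ∈ s <;> by_cases h2 : num ∈ f <;>
        simp [PySem.Set.contains, h1, h2, PySem.Set.mem_inter, PySem.Set.mem_ofList]
    rw [this, Bool.and_assoc]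

-- A's inner index-scan over all lists = List.all over the lists themselves
lemma all_pyRange_pyGetD (lofs : List (List Int)) (num : Int) :
    ((PySem.List.pyRange 0 (lofs.length : Int) 1).all
      (fun index => (PySem.List.pyGetD lofs index []).contains num))
      = lofs.all (fun f => f.contains num) := by
  have hmap := PySem.List.map_pyGetD_pyRange_zero' lofs ([] : List Int)
  calc ((PySem.List.pyRange 0 (lofs.length : Int) 1).all
          (fun index => (PySem.List.pyGetD lofs index []).contains num))
      = (((PySem.List.pyRange 0 (lofs.length : Int) 1).map
          (fun index => PySem.List.pyGetD lofs index [])).all (fun f => f.contains num)) := by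
        rw [List.all_map]; rfl
    _ = lofs.all (fun f => f.contains num) := by rw [hmap]

-- ===== VERDICT (by name: the statement is the Claim_ definition above) =====
theorem get_slice_of_all_factors_spec : Claim_equal_get_slice_of_all_factors := by
  intro lofs _
  unfold Spec_get_slice_of_all_factors
  unfold get_slice_of_all_factors get_slice_of_all_factors_alt
  rw [PySem.List.foldl_pyRange_zero_pyGetD' lofs ([] : List Int)
      (fun slice_list factor => factor.foldl (fun slice_list num =>
        if ((PySem.List.pyRange 0 (lofs.length : Int) 1).all
              (fun index => (PySem.List.pyGetD lofs index []).contains num))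
            && !(slice_list.contains num)
        then slice_list ++ [num] else slice_list) slice_list) []]
  cases lofs with
  | nil => rfl
  | cons f0 rest =>
    have hcond : ∀ num : Int,
        ((PySem.List.pyRange 0 (((f0 :: rest).length : Nat) : Int) 1).all
          (fun index => (PySem.List.pyGetD (f0 :: rest) index []).contains num))
        = PySem.Set.contains
            (rest.foldl (fun s f => PySem.Set.inter s (PySem.Set.ofList f)) (PySem.Set.ofList f0))
            num := by
      intro num
      rw [all_pyRange_pyGetD, contains_foldl_inter]
      have : PySem.Set.contains (PySem.Set.ofList f0) num = f0.contains num := by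
        simp [PySem.Set.contains, PySem.Set.mem_ofList]
      rw [this, List.all_cons]
    simp only [hcond]
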